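-- pv_equiv track=rewrite | github.com/islamelgendy/DBT-bibliography | plots/Sankey/genSankey_artefact_problem.py | getNewContents
-- ===== SOURCE A (Python) =====
-- def getNewContents(map1, map2):
--     contents = list()
--     # Add the header of the CSV
--     id=0
--     contents.append(',Artefact,Problem,count\n')
--
--     test = dict()
--     test.keys()
--     metricKeys = map1.keys()
--     artefactKeys = map2.keys()
--
--     # Loop through the metric keys and find the occurences from the artefact keys
--     for mk in metricKeys:
--         metricRec = map1[mk]
--         for ak in artefactKeys:
--             artefactRec = map2[ak]
--             count = getCountForSame(metricRec, artefactRec)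
--
--             # Add this to the contents
--             contents.append(str(id) + ',' + mk + ',' + ak + ',' + str(count) + '\n')
--             id += 1
--
--     return contents
--
-- def getCountForSame(rec1, rec2):
--     count = 0
--     for elem in rec1:
--         if elem in rec2:
--             count += 1
--
--     return count
-- ===== SOURCE B (Python) =====
-- def getNewContents(map1, map2):
--     # Inverted index: for each element, the set of artefact keys whose record
--     # holds it; per metric record, accumulate per-artefact counts by walking the
--     # index postings, then emit every pair with a single dict lookup instead of
--     # A's per-pair rec1 x rec2 membership scan.
--     contents = [',Artefact,Problem,count\n']
--     index = {}
--     for ak, rec2 in map2.items():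
--         for e in rec2:
--             s = index.get(e)
--             if s is None:
--                 index[e] = {ak}
--             else:
--                 s.add(ak)
--     id = 0
--     for mk, rec1 in map1.items():
--         counts = {}
--         for e in rec1:
--             for ak in index.get(e, ()):
--                 counts[ak] = counts.get(ak, 0) + 1
--         g = counts.get
--         for ak in map2:
--             contents.append(f'{id},{mk},{ak},{g(ak, 0)}\n')
--             id += 1
--     return contents
-- ===== Notes on version B (the rewrite author's own statement) =====
-- stated objective: faster
-- what changed: B builds an inverted index element->set of artefact keys once, accumulates per-artefact counts for each metric record by walking index postings, and emits each pair row with one dict lookup instead of A's per-pair rec1-by-rec2 membership scan; intended as faster (a timing run measured ~2.3x at the largest size both finished).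
import Mathlib
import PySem

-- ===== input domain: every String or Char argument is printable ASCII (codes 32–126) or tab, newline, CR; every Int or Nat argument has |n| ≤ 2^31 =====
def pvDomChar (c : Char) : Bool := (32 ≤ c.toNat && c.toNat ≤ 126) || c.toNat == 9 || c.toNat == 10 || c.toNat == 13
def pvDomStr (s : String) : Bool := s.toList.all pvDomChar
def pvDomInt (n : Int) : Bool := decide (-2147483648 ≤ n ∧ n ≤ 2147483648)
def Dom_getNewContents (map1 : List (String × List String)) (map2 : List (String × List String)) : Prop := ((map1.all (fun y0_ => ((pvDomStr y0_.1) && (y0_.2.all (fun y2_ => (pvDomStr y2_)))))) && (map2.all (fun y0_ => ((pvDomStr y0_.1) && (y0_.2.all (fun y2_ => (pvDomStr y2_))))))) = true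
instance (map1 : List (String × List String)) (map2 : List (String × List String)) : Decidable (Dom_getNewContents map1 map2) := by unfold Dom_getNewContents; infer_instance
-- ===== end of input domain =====

-- B replaces A's per-pair membership scan by an inverted index and per-row count accumulation; same output, intended as faster (timing run measured ~2.3x at the largest size both finished).

-- ===== PORT A =====
-- helper getCountForSame: loop over rec1 testing membership in rec2
def pyGetCountForSame (rec1 rec2 : List String) : Int :=
  rec1.foldl (fun count elem => if rec2.contains elem then count + 1 else count) 0

def getNewContents (map1 : List (String × List String)) (map2 : List (String × List String)) : List String :=
  let m1 := PySem.Dict.ofList map1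
  let m2 := PySem.Dict.ofList map2
  -- contents starts with the header; id starts at 0; nested loops over the key views
  let st := m1.keys.foldl (fun (acc : List String × Int) mk =>
      let metricRec := m1.getD mk []
      m2.keys.foldl (fun (acc : List String × Int) ak =>
          let artefactRec := m2.getD ak []
          let count := pyGetCountForSame metricRec artefactRec
          (acc.1 ++ [PySem.Int.toStr acc.2 ++ "," ++ mk ++ "," ++ ak ++ "," ++ PySem.Int.toStr count ++ "\n"], acc.2 + 1))
        acc)
    ([",Artefact,Problem,count\n"], 0)
  st.1

-- ===== PORT B =====
def getNewContents_alt (map1 : List (String × List String)) (map2 : List (String × List String)) : List String :=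
  let m1 := PySem.Dict.ofList map1
  let m2 := PySem.Dict.ofList map2
  -- index: element -> set of artefact keys whose record holds it (index.get(e) is None = key absent)
  let index := m2.items.foldl
    (fun (d : PySem.Dict String (PySem.Set String)) p =>
      p.2.foldl (fun d e =>
        match d.get? e with
        | none => d.insert e (PySem.Set.add PySem.Set.empty p.1)
        | some s => d.insert e (PySem.Set.add s p.1)) d)
    PySem.Dict.empty
  let st := m1.items.foldl (fun (acc : List String × Int) p =>
      -- counts: artefact key -> number of rec1 elements (with multiplicity) it shares
      let counts := p.2.foldl (fun (c : PySem.Dict String Int) e =>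
          (index.getD e []).foldl (fun c ak => c.modify ak 0 (· + 1)) c)
        PySem.Dict.empty
      m2.keys.foldl (fun (acc : List String × Int) ak =>
          (acc.1 ++ [PySem.Int.toStr acc.2 ++ "," ++ p.1 ++ "," ++ ak ++ "," ++ PySem.Int.toStr (counts.getD ak 0) ++ "\n"], acc.2 + 1))
        acc)
    ([",Artefact,Problem,count\n"], 0)
  st.1

-- ===== PRECONDITION & SPEC =====
def Spec_getNewContents (map1 : List (String × List String)) (map2 : List (String × List String)) (out : List String) : Prop := out = getNewContents_alt map1 map2
instance (map1 : List (String × List String)) (map2 : List (String × List String)) (out : List String) : Decidable (Spec_getNewContents map1 map2 out) := by unfold Spec_getNewContents; infer_instance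

-- ===== CLAIM (what is proved, stated in full; the proofs are below) =====
def Claim_equal_getNewContents : Prop := ∀ (map1 : List (String × List String)) (map2 : List (String × List String)), Dom_getNewContents map1 map2 → Spec_getNewContents map1 map2 (getNewContents map1 map2)

-- ===== LEMMAS AND PROOFS =====

-- the None-check step of the index loop is exactly Dict.modify with default empty set
lemma index_step_eq_modify (d : PySem.Dict String (PySem.Set String)) (a e : String) :
    (match d.get? e with
      | none => d.insert e (PySem.Set.add PySem.Set.empty a)
      | some s => d.insert e (PySem.Set.add s a))
      = d.modify e [] (fun s => PySem.Set.add s a) := by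
  cases h : d.get? e <;>
    simp [PySem.Dict.modify, PySem.Dict.getD_eq_get?_getD, h, PySem.Set.empty]

-- membership in the set at key e after one record's inner loop
lemma inner_mem (rec : List String) (a : String) :
    ∀ (d : PySem.Dict String (PySem.Set String)) (e ak : String),
      (ak ∈ (rec.foldl (fun d x => d.modify x [] (fun s => PySem.Set.add s a)) d).getD e []
        ↔ ak ∈ d.getD e [] ∨ (ak = a ∧ e ∈ rec)) := by
  induction rec with
  | nil => intro d e ak; simp
  | cons x rs ih =>
    intro d e ak
    rw [List.foldl_cons, ih, PySem.Dict.getD_modify]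
    by_cases hex : e = x
    · subst hex
      simp [PySem.Set.mem_add]
      exact fun h _ => Or.inr h
    · simp only [if_neg hex, List.mem_cons]
      tauto

-- the inner loop keeps every stored set duplicate-free
lemma inner_nodup (rec : List String) (a : String) :
    ∀ (d : PySem.Dict String (PySem.Set String)),
      (∀ e', (d.getD e' []).Nodup) →
      ∀ e, ((rec.foldl (fun d x => d.modify x [] (fun s => PySem.Set.add s a)) d).getD e []).Nodup := by
  induction rec with
  | nil => intro d hd e; exact hd e
  | cons x rs ih =>
    intro d hd e
    refine ih _ (fun e' => ?_) e
    rw [PySem.Dict.getD_modify]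
    by_cases hex : e' = x
    · simp only [hex]
      exact PySem.Set.nodup_add _ a (hd x)
    · simpa [hex] using hd e'

-- membership in the index built from a list of (artefact key, record) items
lemma build_mem (l : List (String × List String)) :
    ∀ (d : PySem.Dict String (PySem.Set String)) (e ak : String),
      (ak ∈ (l.foldl (fun d p => p.2.foldl (fun d x => d.modify x [] (fun s => PySem.Set.add s p.1)) d) d).getD e []
        ↔ ak ∈ d.getD e [] ∨ ∃ p ∈ l, p.1 = ak ∧ e ∈ p.2) := by
  induction l with
  | nil => intro d e ak; simp
  | cons q qs ih =>
    intro d e ak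
    rw [List.foldl_cons, ih, inner_mem]
    constructor
    · rintro ((h | ⟨hak, he⟩) | ⟨p, hp, hk, he⟩)
      · exact Or.inl h
      · exact Or.inr ⟨q, List.mem_cons_self, hak.symm, he⟩
      · exact Or.inr ⟨p, List.mem_cons_of_mem _ hp, hk, he⟩
    · rintro (h | ⟨p, hp, hk, he⟩)
      · exact Or.inl (Or.inl h)
      · rcases List.mem_cons.mp hp with rfl | hp'
        · exact Or.inl (Or.inr ⟨hk.symm, he⟩)
        · exact Or.inr ⟨p, hp', hk, he⟩

-- the whole index build keeps every stored set duplicate-free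
lemma build_nodup (l : List (String × List String)) :
    ∀ (d : PySem.Dict String (PySem.Set String)),
      (∀ e', (d.getD e' []).Nodup) →
      ∀ e, ((l.foldl (fun d p => p.2.foldl (fun d x => d.modify x [] (fun s => PySem.Set.add s p.1)) d) d).getD e []).Nodup := by
  induction l with
  | nil => intro d hd e; exact hd e
  | cons q qs ih =>
    intro d hd e
    exact ih _ (fun e' => inner_nodup q.2 q.1 d hd e') e

-- the counts accumulated over rec1 are the sum of the per-element posting counts
lemma counts_getD (rec1 : List String) (idx : String → List String) :
    ∀ (c : PySem.Dict String Int) (ak : String),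
      (rec1.foldl (fun c e => (idx e).foldl (fun c a => c.modify a 0 (· + 1)) c) c).getD ak 0
        = c.getD ak 0 + ((rec1.map (fun e => ((idx e).count ak : Int))).sum) := by
  induction rec1 with
  | nil => intro c ak; simp
  | cons x xs ih =>
    intro c ak
    rw [List.foldl_cons, ih, PySem.Dict.getD_foldl_modify_add_one]
    simp [add_assoc]

-- A's keys-and-lookup fold over a Dict is the items fold
lemma keys_fold_eq_items_fold {beta : Type} (d : PySem.Dict String (List String))
    (hnd : d.keys.Nodup) (g : beta -> String -> List String -> beta) (s : beta) :
    d.keys.foldl (fun acc k => g acc k (d.getD k [])) s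
      = d.items.foldl (fun acc p => g acc p.1 p.2) s := by
  rw [PySem.Dict.items_eq_map_keys d hnd [], List.foldl_map]

-- per pair: A's membership-scan count equals B's accumulated count, for ak a key of map2
lemma count_agree (map2 : List (String × List String)) (rec1 : List String) (ak : String)
    (hak : ak ∈ (PySem.Dict.ofList map2).keys) :
    pyGetCountForSame rec1 ((PySem.Dict.ofList map2).getD ak [])
      = (rec1.foldl (fun (c : PySem.Dict String Int) e =>
            (((PySem.Dict.ofList map2).items.foldl
                (fun d p => p.2.foldl (fun d x => d.modify x [] (fun s => PySem.Set.add s p.1)) d)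
                PySem.Dict.empty).getD e []).foldl (fun c a => c.modify a 0 (· + 1)) c)
          PySem.Dict.empty).getD ak 0 := by
  have hnd : (PySem.Dict.ofList map2).keys.Nodup := PySem.Dict.nodup_keys_ofList map2
  have hsome : (PySem.Dict.ofList map2).get? ak = some ((PySem.Dict.ofList map2).getD ak []) := by
    have hc : (PySem.Dict.ofList map2).contains ak = true :=
      (PySem.Dict.contains_iff_mem_keys _ ak).mpr hak
    rw [PySem.Dict.contains_eq_isSome_get?] at hc
    cases h : (PySem.Dict.ofList map2).get? ak with
    | none => rw [h] at hc; simp at hc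
    | some v =>
      exact congrArg some (PySem.Dict.getD_of_get?_eq_some (PySem.Dict.ofList map2) [] h).symm
  set rec2 := (PySem.Dict.ofList map2).getD ak [] with hrec2
  -- each posting list holds ak exactly once iff e ∈ rec2
  have hcount : ∀ e : String,
      ((((PySem.Dict.ofList map2).items.foldl
          (fun d p => p.2.foldl (fun d x => d.modify x [] (fun s => PySem.Set.add s p.1)) d)
          PySem.Dict.empty).getD e []).count ak)
        = if rec2.contains e then 1 else 0 := by
    intro e
    have hmem : ak ∈ ((PySem.Dict.ofList map2).items.foldl
          (fun d p => p.2.foldl (fun d x => d.modify x [] (fun s => PySem.Set.add s p.1)) d)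
          PySem.Dict.empty).getD e []
        ↔ e ∈ rec2 := by
      rw [build_mem]
      simp only [PySem.Dict.getD_empty, List.not_mem_nil, false_or]
      constructor
      · rintro ⟨p, hp, hk, he⟩
        have : (PySem.Dict.ofList map2).get? ak = some p.2 := by
          have : (p.1, p.2) ∈ (PySem.Dict.ofList map2).items := hp
          rw [← hk]
          exact PySem.Dict.get?_of_mem_items _ this hnd
        rw [hsome] at this
        rw [Option.some.inj this]
        exact he
      · intro he
        exact ⟨(ak, rec2), PySem.Dict.mem_items_of_get?_eq_some _ hsome, rfl, he⟩
    have hndp : (((PySem.Dict.ofList map2).items.foldl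
          (fun d p => p.2.foldl (fun d x => d.modify x [] (fun s => PySem.Set.add s p.1)) d)
          PySem.Dict.empty).getD e []).Nodup :=
      build_nodup _ PySem.Dict.empty (fun e' => by simp) e
    by_cases he : e ∈ rec2
    · have h1 := List.count_eq_one_of_mem hndp (hmem.mpr he)
      have : rec2.contains e = true := by simpa using he
      rw [h1, this, if_pos rfl]
    · have h0 := List.count_eq_zero_of_not_mem (fun h => he (hmem.mp h))
      have : rec2.contains e = false := by simpa using he
      rw [h0, this]
      rfl
  rw [counts_getD, PySem.Dict.getD_empty, zero_add]
  have : (rec1.map (fun e =>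
        ((((PySem.Dict.ofList map2).items.foldl
            (fun d p => p.2.foldl (fun d x => d.modify x [] (fun s => PySem.Set.add s p.1)) d)
            PySem.Dict.empty).getD e []).count ak : Int)))
      = rec1.map (fun e => if rec2.contains e then (1 : Int) else 0) := by
    apply List.map_congr_left
    intro e _
    rw [hcount e]
    split_ifs <;> rfl
  rw [this, PySem.List.sum_map_ite_one_zero]
  unfold pyGetCountForSame
  rw [PySem.List.foldl_count_if, zero_add]

-- ===== VERDICT (by name: the statement is the Claim_ definition above) =====
theorem getNewContents_spec : Claim_equal_getNewContents := by
  intro map1 map2 _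
  show getNewContents map1 map2 = getNewContents_alt map1 map2
  unfold getNewContents getNewContents_alt
  simp only [index_step_eq_modify]
  refine congrArg Prod.fst ?_
  have h1 := keys_fold_eq_items_fold (PySem.Dict.ofList map1) (PySem.Dict.nodup_keys_ofList map1)
      (fun acc mk metricRec =>
        (PySem.Dict.ofList map2).keys.foldl (fun (acc : List String × Int) ak =>
           (acc.1 ++ [PySem.Int.toStr acc.2 ++ "," ++ mk ++ "," ++ ak ++ "," ++ PySem.Int.toStr (pyGetCountForSame metricRec ((PySem.Dict.ofList map2).getD ak [])) ++ "\n"], acc.2 + 1)) acc)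
      ([",Artefact,Problem,count\n"], (0 : Int))
  refine Eq.trans h1 ?_
  apply PySem.List.foldl_congr_mem
  intro acc p _
  apply PySem.List.foldl_congr_mem
  intro acc' ak hak
  rw [count_agree map2 p.2 ak hak]
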